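-- pv_equiv track=rewrite | github.com/ManuelZierl/doxa | doxa/core/branch.py | _split_ax_statements
-- ===== SOURCE A (Python) =====
-- def _split_ax_statements(inp: str) -> list[str]:
--     parts: list[str] = []
--     buf: list[str] = []
--
--     depth_paren = 0
--     depth_brace = 0
--     in_single = False
--     in_double = False
--     escape = False
--
--     for ch in inp:
--         if escape:
--             buf.append(ch)
--             escape = False
--             continue
--
--         if ch == "\\" and in_double:
--             buf.append(ch)
--             escape = True
--             continue
--
--         if ch == "'" and not in_double:
--             buf.append(ch)
--             in_single = not in_single
--             continue
--
--         if ch == '"' and not in_single: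
--             buf.append(ch)
--             in_double = not in_double
--             continue
--
--         if in_single or in_double:
--             buf.append(ch)
--             continue
--
--         if ch == "(":
--             depth_paren += 1
--             buf.append(ch)
--             continue
--
--         if ch == ")":
--             depth_paren -= 1
--             if depth_paren < 0:
--                 raise ValueError("Unbalanced parentheses in AX program.")
--             buf.append(ch)
--             continue
--
--         if ch == "{":
--             depth_brace += 1
--             buf.append(ch)
--             continue
--
--         if ch == "}":
--             depth_brace -= 1
--             if depth_brace < 0:
--                 raise ValueError("Unbalanced braces in AX program.")
--             buf.append(ch)
--             continue
--
--         if ch == "." and depth_paren == 0 and depth_brace == 0: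
--             part = "".join(buf).strip()
--             if not part:
--                 raise ValueError("Empty AX statement between '.' delimiters.")
--             parts.append(part)
--             buf = []
--             continue
--
--         buf.append(ch)
--
--     if in_single or in_double:
--         raise ValueError("Unterminated quoted string in AX program.")
--     if depth_paren != 0:
--         raise ValueError("Unbalanced parentheses in AX program.")
--     if depth_brace != 0:
--         raise ValueError("Unbalanced braces in AX program.")
--
--     tail = "".join(buf).strip()
--     if tail:
--         raise ValueError("AX program must terminate each statement with '.'")
--
--     return parts
-- ===== SOURCE B (Python) =====
-- def _split_ax_statements(inp: str) -> list[str]: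
--     parts: list[str] = []
--     buf: list[str] = []
--     depth_paren = 0
--     depth_brace = 0
--     i = 0
--     n = len(inp)
--     while i < n:
--         ch = inp[i]
--         if ch == "'":
--             buf.append(ch)
--             i += 1
--             closed = False
--             while i < n:
--                 c = inp[i]
--                 buf.append(c)
--                 i += 1
--                 if c == "'":
--                     closed = True
--                     break
--             if not closed:
--                 raise ValueError("Unterminated quoted string in AX program.")
--             continue
--         if ch == '"':
--             buf.append(ch)
--             i += 1
--             closed = False
--             while i < n:
--                 c = inp[i]
--                 if c == "\\":
--                     buf.append(c)
--                     if i + 1 < n: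
--                         buf.append(inp[i + 1])
--                     i += 2
--                     continue
--                 buf.append(c)
--                 i += 1
--                 if c == '"':
--                     closed = True
--                     break
--             if not closed:
--                 raise ValueError("Unterminated quoted string in AX program.")
--             continue
--         if ch == "(":
--             depth_paren += 1
--             buf.append(ch)
--         elif ch == ")":
--             depth_paren -= 1
--             if depth_paren < 0:
--                 raise ValueError("Unbalanced parentheses in AX program.")
--             buf.append(ch)
--         elif ch == "{":
--             depth_brace += 1
--             buf.append(ch)
--         elif ch == "}":
--             depth_brace -= 1
--             if depth_brace < 0:
--                 raise ValueError("Unbalanced braces in AX program.")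
--             buf.append(ch)
--         elif ch == "." and depth_paren == 0 and depth_brace == 0:
--             part = "".join(buf).strip()
--             if not part:
--                 raise ValueError("Empty AX statement between '.' delimiters.")
--             parts.append(part)
--             buf = []
--         else:
--             buf.append(ch)
--         i += 1
--     if depth_paren != 0:
--         raise ValueError("Unbalanced parentheses in AX program.")
--     if depth_brace != 0:
--         raise ValueError("Unbalanced braces in AX program.")
--     tail = "".join(buf).strip()
--     if tail:
--         raise ValueError("AX program must terminate each statement with '.'")
--     return parts
-- ===== Notes on version B (the rewrite author's own statement) =====
-- stated objective: alternative
-- what changed: Replaces A's per-character flag machine (in_single/in_double/escape) by an index-based top-level loop that, on a quote character, runs a nested forward scan consuming the whole quoted literal (with '\' escape handling only inside double quotes) before returning to top level.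
import Mathlib
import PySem

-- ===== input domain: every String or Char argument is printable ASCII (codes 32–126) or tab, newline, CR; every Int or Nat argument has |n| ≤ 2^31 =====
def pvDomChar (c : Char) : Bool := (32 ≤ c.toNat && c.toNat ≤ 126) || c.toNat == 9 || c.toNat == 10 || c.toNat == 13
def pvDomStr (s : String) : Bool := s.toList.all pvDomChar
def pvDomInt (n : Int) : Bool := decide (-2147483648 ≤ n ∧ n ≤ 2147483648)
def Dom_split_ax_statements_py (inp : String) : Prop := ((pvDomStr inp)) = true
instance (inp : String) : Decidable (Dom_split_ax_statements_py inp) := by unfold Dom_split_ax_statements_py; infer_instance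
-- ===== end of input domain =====

-- B replaces A's in_single/in_double/escape flag machinery by nested forward scans that
-- consume a whole quoted literal at once (objective: simpler top-level loop, same cost).
-- On inputs where the Python raises ValueError both ports return [] (excluded by Pre_).

-- ===== PORT A =====
-- state: (parts, buf, depth_paren, depth_brace, in_single, in_double); none = ValueError raised
def loopA (parts : List String) (buf : List Char) (dp db : Int) (s d e : Bool) :
    List Char → Option (List String × List Char × Int × Int × Bool × Bool)
  | [] => some (parts, buf, dp, db, s, d)
  | ch :: rest =>
    if e then loopA parts (buf ++ [ch]) dp db s d false rest
    else if ch == '\\' && d then loopA parts (buf ++ [ch]) dp db s d true rest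
    else if ch == '\'' && !d then loopA parts (buf ++ [ch]) dp db (!s) d false rest
    else if ch == '"' && !s then loopA parts (buf ++ [ch]) dp db s (!d) false rest
    else if s || d then loopA parts (buf ++ [ch]) dp db s d false rest
    else if ch == '(' then loopA parts (buf ++ [ch]) (dp + 1) db s d false rest
    else if ch == ')' then
      (if dp - 1 < 0 then none else loopA parts (buf ++ [ch]) (dp - 1) db s d false rest)
    else if ch == '{' then loopA parts (buf ++ [ch]) dp (db + 1) s d false rest
    else if ch == '}' then
      (if db - 1 < 0 then none else loopA parts (buf ++ [ch]) dp (db - 1) s d false rest)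
    else if ch == '.' && dp == 0 && db == 0 then
      (if PySem.Str.strip (String.ofList buf) == "" then none
       else loopA (parts ++ [PySem.Str.strip (String.ofList buf)]) [] dp db s d false rest)
    else loopA parts (buf ++ [ch]) dp db s d false rest

-- the final checks after A's loop ('raise' = [])
def finA : Option (List String × List Char × Int × Int × Bool × Bool) → List String
  | none => []
  | some (parts, buf, dp, db, s, d) =>
    if s || d then []
    else if dp != 0 then []
    else if db != 0 then []
    else if PySem.Str.strip (String.ofList buf) != "" then [] else parts

def split_ax_statements_py (inp : String) : List String :=
  finA (loopA [] [] 0 0 false false false inp.toList)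

-- ===== PORT B =====
-- B's inner scan of a single-quoted literal: content through the closing quote, and the rest
def scanSingle : List Char → Option (List Char × List Char)
  | [] => none
  | c :: rest =>
    if c == '\'' then some ([c], rest)
    else (scanSingle rest).map (fun p => (c :: p.1, p.2))

-- B's inner scan of a double-quoted literal ('\' consumes the following character literally)
def scanDouble : List Char → Option (List Char × List Char)
  | [] => none
  | c :: rest =>
    if c == '\\' then
      match rest with
      | [] => none
      | c2 :: rest2 => (scanDouble rest2).map (fun p => (c :: c2 :: p.1, p.2))
    else if c == '"' then some ([c], rest)
    else (scanDouble rest).map (fun p => (c :: p.1, p.2))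

theorem scanSingle_length {cs ct r : List Char} (h : scanSingle cs = some (ct, r)) :
    r.length < cs.length := by
  induction cs generalizing ct r with
  | nil => simp [scanSingle] at h
  | cons c rest ih =>
    by_cases hc : c == '\''
    · simp [scanSingle, hc] at h
      simp [← h.2]
    · simp only [scanSingle, hc, if_neg, Bool.false_eq_true, if_false, Option.map_eq_some_iff] at h
      obtain ⟨⟨ct', r'⟩, hp, he⟩ := h
      cases he
      exact Nat.lt_trans (ih hp) (Nat.lt_succ_self _)

theorem scanDouble_length_aux (n : Nat) : ∀ (cs : List Char), cs.length ≤ n →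
    ∀ {ct r : List Char}, scanDouble cs = some (ct, r) → r.length < cs.length := by
  induction n with
  | zero =>
    intro cs hlen ct r h
    have : cs = [] := List.eq_nil_of_length_eq_zero (Nat.le_zero.mp hlen)
    subst this; simp [scanDouble] at h
  | succ n ih =>
    intro cs hlen ct r h
    cases cs with
    | nil => simp [scanDouble] at h
    | cons c rest =>
      by_cases hb : c == '\\'
      · cases rest with
        | nil => simp [scanDouble, hb] at h
        | cons c2 rest2 =>
          rw [scanDouble.eq_def] at h
          simp only [hb, if_true, Option.map_eq_some_iff] at h
          obtain ⟨⟨ct', r'⟩, hp, he⟩ := h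
          cases he
          have hlen2 : rest2.length ≤ n := by simp only [List.length_cons] at hlen; omega
          have := ih rest2 hlen2 hp
          simp only [List.length_cons]; omega
      · by_cases hq : c == '"'
        · rw [scanDouble.eq_def] at h
          simp only [hb, hq, Bool.false_eq_true, if_false, if_true, Option.some.injEq,
            Prod.mk.injEq] at h
          simp [← h.2]
        · rw [scanDouble.eq_def] at h
          simp only [hb, hq, Bool.false_eq_true, if_false, Option.map_eq_some_iff] at h
          obtain ⟨⟨ct', r'⟩, hp, he⟩ := h
          cases he
          have hlen2 : rest.length ≤ n := by simp only [List.length_cons] at hlen; omega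
          exact Nat.lt_trans (ih rest hlen2 hp) (Nat.lt_succ_self _)

theorem scanDouble_length {cs ct r : List Char} (h : scanDouble cs = some (ct, r)) :
    r.length < cs.length :=
  scanDouble_length_aux cs.length cs (Nat.le_refl _) h

-- B's top-level loop: index-free rendering of the index/while loop of Source B
def loopB (parts : List String) (buf : List Char) (dp db : Int) :
    List Char → Option (List String × List Char × Int × Int)
  | [] => some (parts, buf, dp, db)
  | ch :: rest =>
    if ch == '\'' then
      match h : scanSingle rest with
      | none => none
      | some (ct, rest') => loopB parts (buf ++ ch :: ct) dp db rest'
    else if ch == '"' then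
      match h : scanDouble rest with
      | none => none
      | some (ct, rest') => loopB parts (buf ++ ch :: ct) dp db rest'
    else if ch == '(' then loopB parts (buf ++ [ch]) (dp + 1) db rest
    else if ch == ')' then
      (if dp - 1 < 0 then none else loopB parts (buf ++ [ch]) (dp - 1) db rest)
    else if ch == '{' then loopB parts (buf ++ [ch]) dp (db + 1) rest
    else if ch == '}' then
      (if db - 1 < 0 then none else loopB parts (buf ++ [ch]) dp (db - 1) rest)
    else if ch == '.' && dp == 0 && db == 0 then
      (if PySem.Str.strip (String.ofList buf) == "" then none
       else loopB (parts ++ [PySem.Str.strip (String.ofList buf)]) [] dp db rest)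
    else loopB parts (buf ++ [ch]) dp db rest
termination_by cs => cs.length
decreasing_by
  · exact Nat.lt_trans (scanSingle_length h) (Nat.lt_succ_self _)
  · exact Nat.lt_trans (scanDouble_length h) (Nat.lt_succ_self _)
  all_goals simp

-- the final checks after B's loop ('raise' = [])
def finB : Option (List String × List Char × Int × Int) → List String
  | none => []
  | some (parts, buf, dp, db) =>
    if dp != 0 then []
    else if db != 0 then []
    else if PySem.Str.strip (String.ofList buf) != "" then [] else parts

def split_ax_statements_py_alt (inp : String) : List String :=
  finB (loopB [] [] 0 0 inp.toList)

-- ===== PRECONDITION & SPEC =====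
-- validity condition on the input's shape, decided by one scan over the characters; it keeps
-- no buffers and builds no output (it is not either port's recursion)
def axOk (dp db : Int) (s d e hc : Bool) : List Char → Bool
  | [] => !s && !d && dp == 0 && db == 0 && !hc
  | c :: rest =>
    if e then axOk dp db s d false (hc || !(PySem.Chars.isspace c)) rest
    else if c == '\\' && d then axOk dp db s d true true rest
    else if c == '\'' && !d then axOk dp db (!s) d false true rest
    else if c == '"' && !s then axOk dp db s (!d) false true rest
    else if s || d then axOk dp db s d false (hc || !(PySem.Chars.isspace c)) rest
    else if c == '(' then axOk (dp + 1) db s d false true rest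
    else if c == ')' then (if dp - 1 < 0 then false else axOk (dp - 1) db s d false true rest)
    else if c == '{' then axOk dp (db + 1) s d false true rest
    else if c == '}' then (if db - 1 < 0 then false else axOk dp (db - 1) s d false true rest)
    else if c == '.' && dp == 0 && db == 0 then (if hc then axOk dp db s d false false rest else false)
    else axOk dp db s d false (hc || !(PySem.Chars.isspace c)) rest

-- exactly the inputs on which the Python A returns (no ValueError): quotes terminated,
-- parentheses/braces balanced outside quotes, every statement non-blank, blank tail
def Pre_split_ax_statements_py (inp : String) : Prop :=
  axOk 0 0 false false false false inp.toList = true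
instance (inp : String) : Decidable (Pre_split_ax_statements_py inp) := by
  unfold Pre_split_ax_statements_py; infer_instance

def pvWitness_split_ax_statements_py : String := "p(a). { q }."

def Spec_split_ax_statements_py (inp : String) (out : List String) : Prop :=
  out = split_ax_statements_py_alt inp
instance (inp : String) (out : List String) : Decidable (Spec_split_ax_statements_py inp out) := by
  unfold Spec_split_ax_statements_py; infer_instance

-- ===== CLAIM (what is proved, stated in full; the proofs are below) =====
def Claim_equal_split_ax_statements_py : Prop := ∀ (inp : String), Dom_split_ax_statements_py inp → Pre_split_ax_statements_py inp → Spec_split_ax_statements_py inp (split_ax_statements_py inp)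

-- ===== LEMMAS AND PROOFS =====

-- A's loop in single-quote mode runs to the closing quote exactly like B's scanSingle
theorem loopA_single (cs : List Char) : ∀ (parts : List String) (buf : List Char) (dp db : Int),
    loopA parts buf dp db true false false cs =
      match scanSingle cs with
      | none => some (parts, buf ++ cs, dp, db, true, false)
      | some (ct, rest) => loopA parts (buf ++ ct) dp db false false false rest := by
  induction cs with
  | nil => intro parts buf dp db; simp [loopA, scanSingle]
  | cons c rest ih =>
    intro parts buf dp db
    by_cases hq : c == '\''
    · simp [loopA, scanSingle, hq]
    · simp only [loopA, scanSingle, hq, Bool.false_and, Bool.and_false, Bool.and_true,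
        Bool.not_false, Bool.false_eq_true, if_false, Bool.true_or, if_true]
      rw [ih]
      cases hs : scanSingle rest with
      | none => simp
      | some p => cases p; simp

-- A's loop in double-quote mode (escape off) either never closes the quote (scanDouble = none,
-- A ends still in_double) or closes it exactly like B's scanDouble
theorem loopA_double (n : Nat) : ∀ (cs : List Char), cs.length ≤ n →
    ∀ (parts : List String) (buf : List Char) (dp db : Int),
    (match scanDouble cs with
     | none => ∃ buf', loopA parts buf dp db false true false cs = some (parts, buf', dp, db, false, true)
     | some (ct, rest) =>
        loopA parts buf dp db false true false cs = loopA parts (buf ++ ct) dp db false false false rest) := by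
  induction n with
  | zero =>
    intro cs hlen parts buf dp db
    have : cs = [] := List.eq_nil_of_length_eq_zero (Nat.le_zero.mp hlen)
    subst this
    simp [scanDouble, loopA]
  | succ n ih =>
    intro cs hlen parts buf dp db
    cases cs with
    | nil => simp [scanDouble, loopA]
    | cons c rest =>
      by_cases hb : c == '\\'
      · cases rest with
        | nil =>
          simp [scanDouble, loopA, hb]
        | cons c2 rest2 =>
          have hstep : loopA parts buf dp db false true false (c :: c2 :: rest2) =
              loopA parts (buf ++ [c] ++ [c2]) dp db false true false rest2 := by
            simp [loopA, hb]
          have hlen2 : rest2.length ≤ n := by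
            simp only [List.length_cons] at hlen; omega
          have := ih rest2 hlen2 parts (buf ++ [c] ++ [c2]) dp db
          rw [scanDouble.eq_def]
          simp only [hb, if_true]
          cases hs : scanDouble rest2 with
          | none =>
            simp only [hs, Option.map_none] at this ⊢
            obtain ⟨buf', hb'⟩ := this
            exact ⟨buf', by rw [hstep, hb']⟩
          | some p =>
            obtain ⟨ct, r⟩ := p
            simp only [hs, Option.map_some] at this ⊢
            rw [hstep, this]
            simp
      · by_cases hq : c == '"'
        · have hsd : scanDouble (c :: rest) = some ([c], rest) := by
            rw [scanDouble.eq_def]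
            simp [hb, hq]
          simp only [hsd]
          simp [loopA, hb, hq]
        · have hstep : loopA parts buf dp db false true false (c :: rest) =
              loopA parts (buf ++ [c]) dp db false true false rest := by
            simp [loopA, hb, hq]
          have hlen2 : rest.length ≤ n := by
            simp only [List.length_cons] at hlen; omega
          have := ih rest hlen2 parts (buf ++ [c]) dp db
          rw [scanDouble.eq_def]
          simp only [hb, hq, Bool.false_eq_true, if_false]
          cases hs : scanDouble rest with
          | none =>
            simp only [hs, Option.map_none] at this ⊢
            obtain ⟨buf', hb'⟩ := this
            exact ⟨buf', by rw [hstep, hb']⟩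
          | some p =>
            obtain ⟨ct, r⟩ := p
            simp only [hs, Option.map_some] at this ⊢
            rw [hstep, this]
            simp

-- the heart: at top level (no quote mode, no escape) A's flag loop and B's nested-scan loop
-- produce the same final answer from the same state
theorem loopAB (n : Nat) : ∀ (cs : List Char), cs.length ≤ n →
    ∀ (parts : List String) (buf : List Char) (dp db : Int),
    finA (loopA parts buf dp db false false false cs) = finB (loopB parts buf dp db cs) := by
  induction n with
  | zero =>
    intro cs hlen parts buf dp db
    have : cs = [] := List.eq_nil_of_length_eq_zero (Nat.le_zero.mp hlen)
    subst this
    simp [loopA, loopB, finA, finB]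
  | succ n ih =>
    intro cs hlen parts buf dp db
    cases cs with
    | nil => simp [loopA, loopB, finA, finB]
    | cons c rest =>
      have hlen1 : rest.length ≤ n := by simp only [List.length_cons] at hlen; omega
      by_cases h1 : c == '\''
      · have hA : loopA parts buf dp db false false false (c :: rest) =
            loopA parts (buf ++ [c]) dp db true false false rest := by
          simp [loopA, h1]
        have hB : loopB parts buf dp db (c :: rest) =
            match scanSingle rest with
            | none => none
            | some (ct, rest') => loopB parts (buf ++ c :: ct) dp db rest' := by
          simp only [loopB, h1, if_true]
          split <;> rename_i heq <;> simp only [heq]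
        rw [hA, loopA_single rest, hB]
        cases hs : scanSingle rest with
        | none => simp [finA, finB]
        | some p =>
          obtain ⟨ct, r⟩ := p
          have hr : r.length ≤ n := by
            have := scanSingle_length hs; omega
          rw [ih r hr]
          simp [List.append_assoc]
      · by_cases h2 : c == '"'
        · have hA : loopA parts buf dp db false false false (c :: rest) =
              loopA parts (buf ++ [c]) dp db false true false rest := by
            simp [loopA, h1, h2]
          rw [hA]
          have hB : loopB parts buf dp db (c :: rest) =
              match scanDouble rest with
              | none => none
              | some (ct, rest') => loopB parts (buf ++ c :: ct) dp db rest' := by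
            simp only [loopB, h1, h2, Bool.false_eq_true, if_false, if_true]
            split <;> rename_i heq <;> simp only [heq]
          rw [hB]
          have hd := loopA_double rest.length rest (Nat.le_refl _) parts (buf ++ [c]) dp db
          cases hs : scanDouble rest with
          | none =>
            simp only [hs] at hd
            obtain ⟨buf', hb'⟩ := hd
            rw [hb']
            simp [finA, finB]
          | some p =>
            obtain ⟨ct, r⟩ := p
            simp only [hs] at hd
            rw [hd]
            have hr : r.length ≤ n := by
              have := scanDouble_length hs; omega
            rw [ih r hr]
            simp [List.append_assoc]
        · by_cases h3 : c == '('
          · simp only [loopA, loopB, h1, h2, h3, Bool.and_false, Bool.false_and,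
              Bool.and_true, Bool.not_false, Bool.false_eq_true, if_false, Bool.or_self, if_pos]
            exact ih rest hlen1 parts (buf ++ [c]) (dp + 1) db
          · by_cases h4 : c == ')'
            · simp only [loopA, loopB, h1, h2, h3, h4, Bool.and_false, Bool.false_and,
                Bool.and_true, Bool.not_false, Bool.false_eq_true, if_false, Bool.or_self, if_pos]
              by_cases hdp : dp - 1 < 0
              · simp [hdp, finA, finB]
              · simp only [hdp, if_false]
                exact ih rest hlen1 parts (buf ++ [c]) (dp - 1) db
            · by_cases h5 : c == '{'
              · simp only [loopA, loopB, h1, h2, h3, h4, h5, Bool.and_false, Bool.false_and,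
                  Bool.and_true, Bool.not_false, Bool.false_eq_true, if_false, Bool.or_self, if_pos]
                exact ih rest hlen1 parts (buf ++ [c]) dp (db + 1)
              · by_cases h6 : c == '}'
                · simp only [loopA, loopB, h1, h2, h3, h4, h5, h6, Bool.and_false, Bool.false_and,
                    Bool.and_true, Bool.not_false, Bool.false_eq_true, if_false, Bool.or_self, if_pos]
                  by_cases hdb : db - 1 < 0
                  · simp [hdb, finA, finB]
                  · simp only [hdb, if_false]
                    exact ih rest hlen1 parts (buf ++ [c]) dp (db - 1)
                · by_cases h7 : (c == '.' && dp == 0 && db == 0) = true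
                  · simp only [loopA, loopB, h1, h2, h3, h4, h5, h6, h7, Bool.and_false,
                      Bool.false_and, Bool.and_true, Bool.not_false, Bool.false_eq_true, if_false,
                      Bool.or_self, if_pos]
                    by_cases hp : (PySem.Str.strip (String.ofList buf) == "") = true
                    · simp [hp, finA, finB]
                    · simp only [hp, if_false]
                      exact ih rest hlen1 (parts ++ [PySem.Str.strip (String.ofList buf)]) [] dp db
                  · simp only [loopA, loopB, h1, h2, h3, h4, h5, h6, h7, Bool.and_false,
                      Bool.false_and, Bool.and_true, Bool.not_false, Bool.false_eq_true, if_false,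
                      Bool.or_self]
                    exact ih rest hlen1 parts (buf ++ [c]) dp db

-- ===== VERDICT (by name: the statement is the Claim_ definition above) =====
theorem split_ax_statements_py_spec : Claim_equal_split_ax_statements_py := by
  intro inp _ _
  unfold Spec_split_ax_statements_py split_ax_statements_py split_ax_statements_py_alt
  exact loopAB inp.toList.length inp.toList (Nat.le_refl _) [] [] 0 0
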